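-- pv_equiv track=rewrite | github.com/ryotaro612/lc | src/serial/ambiguous_coordinates.py | build
-- ===== SOURCE A (Python) =====
-- def build(s, cache):
--     if s in cache:
--         return cache[s]
--
--     if len(s) == 1:
--         cache[s] = [s]
--         return cache[s]
--
--     result = []
--
--     if s[0] != '0':
--         result.append(s)
--     n = len(s)
--     for i in range(1, n):
--         if s[i:][-1] == '0':
--             continue
--         if len(s[:i]) > 1 and s[0] == '0':
--             continue
--         result.append(s[:i] + '.' + s[i:])
--
--     return result
-- ===== SOURCE B (Python) =====
-- def build(s, cache):
--     if s in cache: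
--         return cache[s]
--
--     if len(s) == 1:
--         cache[s] = [s]
--         return cache[s]
--
--     result = [s] if s[0] != '0' else []
--     if s[-1] != '0':
--         result += _splits(s[0], s[1:])
--     return result
--
--
-- def _splits(pre, suf):
--     # all decimal placements whose integer part extends `pre` (pre, suf non-empty,
--     # the caller has already ruled out a trailing '0' in the whole string):
--     # emit pre+'.'+suf, then move one character from suffix to prefix and repeat,
--     # stopping when the suffix is down to one character or the prefix is the bare '0'
--     out = []
--     while True:
--         out.append(pre + '.' + suf)
--         if len(suf) > 1 and pre != '0':
--             pre, suf = pre + suf[0], suf[1:]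
--         else:
--             return out
-- ===== Notes on version B (the rewrite author's own statement) =====
-- stated objective: alternative
-- what changed: The index loop with per-iteration slicing and continue filters is replaced by a helper _splits(pre, suf) that walks the string once, moving one character at a time from the incrementally built suffix to the incrementally built prefix and emitting pre+'.'+suf at each step; the leading-zero rule becomes the walk's stopping condition (pre != '0') and the trailing-zero rule a single hoisted check, while the cache lookup/len==1 paths (including the cache write) stay identical.
import Mathlib
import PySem

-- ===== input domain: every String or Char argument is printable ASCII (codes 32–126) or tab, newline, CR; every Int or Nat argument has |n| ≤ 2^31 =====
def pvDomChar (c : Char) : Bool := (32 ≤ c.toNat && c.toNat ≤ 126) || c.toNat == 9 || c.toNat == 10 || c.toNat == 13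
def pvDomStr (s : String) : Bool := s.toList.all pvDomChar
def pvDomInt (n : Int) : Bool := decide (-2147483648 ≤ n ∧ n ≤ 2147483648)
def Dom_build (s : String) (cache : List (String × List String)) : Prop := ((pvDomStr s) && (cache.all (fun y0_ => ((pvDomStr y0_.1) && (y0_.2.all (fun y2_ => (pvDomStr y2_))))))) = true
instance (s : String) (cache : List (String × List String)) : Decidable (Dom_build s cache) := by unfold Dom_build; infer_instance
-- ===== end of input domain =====

-- B replaces A's index loop (per-iteration slicing plus two continue filters) by a walk
-- _splits(pre, suf) that moves one character at a time from suffix to prefix, emitting pre+'.'+suf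
-- at each step; the leading-zero rule becomes the walk's stopping condition and the
-- trailing-zero rule a single hoisted check. Objective: alternative (same cost, different shape).
-- A mutates cache on the len(s)==1 path; B performs the identical mutation, and the equivalence
-- proved here is about the RETURN value.

-- ===== PORT A =====
def build (s : String) (cache : List (String × List String)) : List String :=
  match (PySem.Dict.mk cache).get? s with
  | some v => v
  | none =>
    let cs := s.toList
    if cs.length == 1 then
      [s]
    else
      -- s[0] raises IndexError for empty s; Pre_build excludes that input, so the default is never the value used
      let result : List String := if PySem.List.pyGetD cs 0 ' ' != '0' then [s] else []
      let n : Int := (cs.length : Int)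
      (PySem.List.pyRange 1 n).foldl (fun acc i =>
        if PySem.List.pyGetD (PySem.List.slice cs (some i) none) (-1) ' ' == '0' then acc
        else if decide (1 < (PySem.List.slice cs none (some i)).length) && (PySem.List.pyGetD cs 0 ' ' == '0') then acc
        else acc ++ [String.ofList (PySem.List.slice cs none (some i) ++ '.' :: PySem.List.slice cs (some i) none)]) result

-- ===== PORT B =====
-- port of B's helper _splits(pre, suf): its while loop as the recursion it tail-iterates,
-- emitting pre+'.'+suf then moving one character over while the guard holds
def splitsB (pre : List Char) (suf : List Char) : List String :=
  let out : List String := [String.ofList (pre ++ '.' :: suf)]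
  if _h : 1 < suf.length ∧ pre ≠ ['0'] then
    out ++ splitsB (pre ++ [PySem.List.pyGetD suf 0 ' ']) (PySem.List.slice suf (some 1) none)
  else out
termination_by suf.length
decreasing_by
  rw [PySem.List.slice_from_one]
  simp only [List.length_tail]
  omega

def build_alt (s : String) (cache : List (String × List String)) : List String :=
  match (PySem.Dict.mk cache).get? s with
  | some v => v
  | none =>
    let cs := s.toList
    if cs.length == 1 then
      [s]
    else
      -- s[0] raises IndexError for empty s; Pre_build excludes that input
      let result : List String := if PySem.List.pyGetD cs 0 ' ' != '0' then [s] else []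
      if PySem.List.pyGetD cs (-1) ' ' != '0' then
        result ++ splitsB [PySem.List.pyGetD cs 0 ' '] (PySem.List.slice cs (some 1) none)
      else result

-- ===== PRECONDITION & SPEC =====
-- Pre_ excludes only the empty string when it is not a cache key: there Python A raises IndexError at s[0].
def Pre_build (s : String) (cache : List (String × List String)) : Prop :=
  s.toList ≠ [] ∨ "" ∈ cache.map Prod.fst
instance (s : String) (cache : List (String × List String)) : Decidable (Pre_build s cache) := by unfold Pre_build; infer_instance
def pvWitness_build : String × (List (String × List String)) := ("102", [("7", ["7"])])

def Spec_build (s : String) (cache : List (String × List String)) (out : List String) : Prop := out = build_alt s cache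
instance (s : String) (cache : List (String × List String)) (out : List String) : Decidable (Spec_build s cache out) := by unfold Spec_build; infer_instance

-- ===== CLAIM (what is proved, stated in full; the proofs are below) =====
def Claim_equal_build : Prop := ∀ (s : String) (cache : List (String × List String)), Dom_build s cache → Pre_build s cache → Spec_build s cache (build s cache)

-- ===== LEMMAS AND PROOFS =====

-- inside A's loop, s[i:][-1] is s[-1] and len(s[:i]) is i
lemma last_slice_from (cs : List Char) (i : Int) (h1 : 1 ≤ i) (h2 : i < (cs.length : Int)) :
    PySem.List.pyGetD (PySem.List.slice cs (some i) none) (-1) ' ' = PySem.List.pyGetD cs (-1) ' ' := by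
  have hne : cs ≠ [] := by intro h; subst h; simp at h2; omega
  have hdrop : cs.drop i.toNat ≠ [] := by
    simp only [ne_eq, List.drop_eq_nil_iff, not_le]
    omega
  rw [PySem.List.slice_from cs (by omega), PySem.List.pyGetD_neg_one _ ' ' hdrop,
      PySem.List.pyGetD_neg_one cs ' ' hne]
  exact List.getLast_drop _

lemma len_slice_to (cs : List Char) (i : Int) (h1 : 0 ≤ i) (h2 : i ≤ (cs.length : Int)) :
    ((PySem.List.slice cs none (some i)).length : Int) = i := by
  rw [PySem.List.slice_to cs h1]
  simp
  omega

-- with pre = ['0'] the recursion stops after one emission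
lemma splitsB_zero (suf : List Char) :
    splitsB ['0'] suf = [String.ofList ('0' :: '.' :: suf)] := by
  rw [splitsB]
  simp

-- with a prefix that can never become "0", the recursion emits every split in order
lemma splitsB_map (suf : List Char) (pre : List Char)
    (h0 : pre ≠ []) (h1 : pre ≠ ['0']) (hs : suf ≠ []) :
    splitsB pre suf = (List.range suf.length).map
      (fun k => String.ofList (pre ++ suf.take k ++ '.' :: suf.drop k)) := by
  induction suf generalizing pre with
  | nil => exact absurd rfl hs
  | cons c rest ih =>
    cases rest with
    | nil =>
      rw [splitsB]
      simp
    | cons c2 r2 =>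
      rw [splitsB]
      have hg : 1 < (c :: c2 :: r2).length ∧ pre ≠ ['0'] := ⟨by simp, h1⟩
      rw [dif_pos hg]
      have hget : PySem.List.pyGetD (c :: c2 :: r2) 0 ' ' = c := PySem.List.pyGetD_zero_cons _ _ _
      have hsl : PySem.List.slice (c :: c2 :: r2) (some 1) none = c2 :: r2 := by
        rw [PySem.List.slice_from_one]; rfl
      rw [hget, hsl, ih (pre ++ [c]) (by simp) (by
        intro h
        have := congrArg List.length h
        simp at this
        have : pre = [] := by
          cases pre with
          | nil => rfl
          | cons a t => simp at this
        exact h0 this) (by simp)]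
      rw [show (c :: c2 :: r2).length = (c2 :: r2).length + 1 by simp,
          List.range_succ_eq_map]
      simp [List.map_map, Function.comp]
      intro a ha
      rw [← String.ofList_append]
      simp

theorem build_spec : Claim_equal_build := by
  intro s cache _ hpre
  unfold Spec_build build build_alt
  cases hget : (PySem.Dict.mk cache).get? s with
  | some v => simp
  | none =>
    simp only []
    set cs := s.toList with hcs
    by_cases hlen : cs.length == 1
    · simp [hlen]
    · simp only [hlen, if_false, Bool.false_eq_true]
      set result : List String := if PySem.List.pyGetD cs 0 ' ' != '0' then [s] else [] with hres
      set f : Int → String := fun i =>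
        String.ofList (PySem.List.slice cs none (some i) ++ '.' :: PySem.List.slice cs (some i) none) with hf
      have hne : cs ≠ [] := by
        rcases hpre with h | h
        · exact h
        · intro hnil
          -- if s = "" were a cache key, get? would have hit
          have hs0 : s = "" := by
            have := congrArg String.ofList hnil
            simpa [hcs] using this
          subst hs0
          rw [PySem.Dict.get?_eq_none_iff_not_mem_keys] at hget
          exact hget (by simpa [PySem.Dict.keys] using h)
      have hn2 : 1 < (cs.length : Int) := by
        have : cs.length ≠ 1 := by simpa using hlen
        have : 0 < cs.length := List.length_pos_iff.mpr hne
        omega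
      obtain ⟨h0, t, hct⟩ := List.exists_cons_of_ne_nil hne
      have hhd : PySem.List.pyGetD cs 0 ' ' = h0 := by rw [hct]; exact PySem.List.pyGetD_zero_cons _ _ _
      have htail : PySem.List.slice cs (some 1) none = t := by
        rw [PySem.List.slice_from_one, hct]; rfl
      have htne : t ≠ [] := by
        intro h; rw [hct, h] at hn2; simp at hn2
      by_cases hlast : PySem.List.pyGetD cs (-1) ' ' = '0'
      · -- trailing zero: every iteration of A continues; B skips the whole block
        have : (PySem.List.pyRange 1 (cs.length : Int)).foldl (fun acc i =>
            if PySem.List.pyGetD (PySem.List.slice cs (some i) none) (-1) ' ' == '0' then acc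
            else if decide (1 < (PySem.List.slice cs none (some i)).length) && (PySem.List.pyGetD cs 0 ' ' == '0') then acc
            else acc ++ [f i]) result = result := by
          rw [PySem.List.foldl_congr_mem _ _ (fun acc _ => acc) result ?_]
          · exact List.foldl_fixed _
          · intro acc i hi
            rw [PySem.List.mem_pyRange_one] at hi
            rw [last_slice_from cs i hi.1 hi.2, hlast]
            simp
        rw [this, hlast]
        simp
      · -- no trailing zero
        have hB : (PySem.List.pyGetD cs (-1) ' ' != '0') = true := by
          simp [hlast]
        rw [hB]
        simp only [if_true]
        by_cases hhead : PySem.List.pyGetD cs 0 ' ' = '0'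
        · -- leading zero: only the split after the first digit survives
          rw [PySem.List.foldl_congr_mem _ _ (fun acc i =>
              if i = 1 then acc ++ [f i] else acc) result ?_]
          · rw [PySem.List.pyRange_one_cons hn2]
            simp only [List.foldl_cons]
            rw [PySem.List.foldl_congr_mem _ _ (fun acc _ => acc) _ ?_]
            · rw [List.foldl_fixed]
              rw [hhead, splitsB_zero, htail]
              have h0z : h0 = '0' := by rw [hhd] at hhead; exact hhead
              have hsl1 : PySem.List.slice cs none (some 1) = [h0] := by
                rw [show (1 : Int) = ((1 : Nat) : Int) by simp,
                    PySem.List.slice_to_natCast, hct]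
                rfl
              have hf1 : f 1 = String.ofList ('0' :: '.' :: t) := by
                show String.ofList (PySem.List.slice cs none (some 1) ++ '.' :: PySem.List.slice cs (some 1) none) = _
                rw [hsl1, htail, h0z]
                rfl
              simp [hf1]
            · intro acc i hi
              rw [PySem.List.mem_pyRange_one] at hi
              have : i ≠ 1 := by omega
              simp [this]
          · intro acc i hi
            rw [PySem.List.mem_pyRange_one] at hi
            rw [last_slice_from cs i hi.1 hi.2]
            have hl : ((PySem.List.slice cs none (some i)).length : Int) = i :=
              len_slice_to cs i (by omega) (by omega)
            by_cases h1 : i = 1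
            · subst h1
              simp only []
              have : ¬ (1 < (PySem.List.slice cs none (some 1)).length) := by omega
              simp [hlast, this, hf, String.ofList_append]
            · have : 1 < (PySem.List.slice cs none (some i)).length := by omega
              simp [hlast, hhead, this, h1]
        · -- no leading zero: every split survives; A's loop is the full map, B's recursion too
          rw [PySem.List.foldl_congr_mem _ _ (fun acc i => acc ++ [f i]) result ?_]
          · rw [PySem.List.foldl_append_singleton_eq_map]
            rw [hhd] at hhead ⊢
            rw [htail, splitsB_map t [h0] (by simp) (by simpa using hhead) htne]
            congr 1
            rw [PySem.List.pyRange_one]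
            rw [List.map_map]
            have hlen' : ((cs.length : Int) - 1).toNat = t.length := by
              rw [hct]; simp
            rw [hlen']
            apply List.map_congr_left
            intro k hk
            rw [List.mem_range] at hk
            simp only [Function.comp]
            have hcast : (1 : Int) + (k : Int) = ((k + 1 : Nat) : Int) := by push_cast; ring
            show String.ofList (PySem.List.slice cs none (some (1 + (k : Int))) ++ '.' :: PySem.List.slice cs (some (1 + (k : Int))) none) = _
            rw [hcast, PySem.List.slice_to_natCast, PySem.List.slice_from_natCast, hct]
            simp
          · intro acc i hi
            rw [PySem.List.mem_pyRange_one] at hi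
            rw [last_slice_from cs i hi.1 hi.2]
            simp [hlast, hhead, hf, String.ofList_append]
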